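-- pv_equiv track=rewrite | github.com/Shivanshvohra/random | nodes/fixer_node.py | fan_out
-- ===== SOURCE A (Python) =====
-- from typing import Dict, List, Set, Tuple
--
-- def fan_out(files: Set[str], file_index: Dict[str, Dict], depth: int = 1) -> Set[str]:
--     expanded = set(files)
--     frontier = set(files)
--     for _ in range(depth):
--         next_frontier = set()
--         for fname in frontier:
--             info = file_index.get(fname)
--             if not info:
--                 continue
--             for neighbor_class in info["imports"] + info["calls"]:
--                 neighbor_file = f"{neighbor_class}.java" if not neighbor_class.endswith(".java") else neighbor_class
--                 if neighbor_file in file_index and neighbor_file not in expanded: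
--                     next_frontier.add(neighbor_file)
--         frontier = next_frontier
--         expanded.update(frontier)
--     return expanded
-- ===== SOURCE B (Python) =====
-- def _adjacent(file_index, fname):
--     info = file_index.get(fname)
--     if not info:
--         return []
--     candidates = [c if c.endswith(".java") else c + ".java"
--                   for c in info["imports"] + info["calls"]]
--     return [f for f in candidates if f in file_index]
--
--
-- def fan_out(files, file_index, depth=1):
--     expanded = set(files)
--     for _ in range(depth):
--         fresh = [n for f in expanded
--                  for n in _adjacent(file_index, f)
--                  if n not in expanded]
--         expanded.update(fresh)
--     return expanded
-- ===== Notes on version B (the rewrite author's own statement) =====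
-- stated objective: alternative
-- what changed: B drops A's separate frontier set and its (expanded, frontier) state: it keeps only the expanded set, and each of the depth rounds rescans the whole expanded snapshot through a per-node adjacency helper, collecting the not-yet-seen neighbours and unioning them in after the round; the result is the same depth-bounded reachable set.
import Mathlib
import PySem

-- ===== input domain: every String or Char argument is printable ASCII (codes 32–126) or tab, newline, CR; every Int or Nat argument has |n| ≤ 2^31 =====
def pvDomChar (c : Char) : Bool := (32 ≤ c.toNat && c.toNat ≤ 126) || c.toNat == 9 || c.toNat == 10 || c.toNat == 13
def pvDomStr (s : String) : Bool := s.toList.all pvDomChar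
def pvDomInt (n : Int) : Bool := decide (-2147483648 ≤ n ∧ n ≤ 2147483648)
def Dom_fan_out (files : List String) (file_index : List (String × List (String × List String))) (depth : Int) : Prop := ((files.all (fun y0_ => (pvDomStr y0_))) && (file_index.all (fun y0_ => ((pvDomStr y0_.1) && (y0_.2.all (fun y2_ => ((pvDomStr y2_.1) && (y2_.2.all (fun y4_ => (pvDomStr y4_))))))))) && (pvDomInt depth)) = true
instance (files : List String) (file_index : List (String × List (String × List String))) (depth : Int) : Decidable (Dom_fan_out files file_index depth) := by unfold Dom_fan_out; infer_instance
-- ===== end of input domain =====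

-- B drops A's separate frontier set and instead rescans the whole expanded set each round
-- (alternative decomposition, same return value). Equivalence is about the return value;
-- neither program mutates its arguments.

-- ===== PORT A =====
-- `info["imports"]` / `info["calls"]` raise KeyError when the key is missing; those inputs are
-- outside Pre_fan_out below, so the port may read them with getD.
def fan_out (files : List String) (file_index : List (String × List (String × List String))) (depth : Int) : List String :=
  let fi : PySem.Dict String (List (String × List String)) := PySem.Dict.ofList file_index
  let expanded0 : PySem.Set String := PySem.Set.ofList files
  let final :=
    (PySem.List.pyRange 0 depth 1).foldl
      (fun (st : PySem.Set String × PySem.Set String) _ =>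
        let next_frontier :=
          st.2.foldl
            (fun (nf : PySem.Set String) fname =>
              match PySem.Dict.get? fi fname with
              | none => nf          -- `if not info: continue` (None case)
              | some info =>
                if info.isEmpty then nf   -- `if not info: continue` (empty-dict case)
                else
                  ((PySem.Dict.ofList info).getD "imports" [] ++ (PySem.Dict.ofList info).getD "calls" []).foldl
                    (fun (nf : PySem.Set String) c =>
                      let neighbor_file := if PySem.Str.endswith c ".java" then c else c ++ ".java"
                      if PySem.Dict.contains fi neighbor_file && !(PySem.Set.contains st.1 neighbor_file)
                      then PySem.Set.add nf neighbor_file else nf)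
                    nf)
            PySem.Set.empty
        (PySem.Set.update st.1 next_frontier, next_frontier))
      (expanded0, expanded0)
  final.1

-- ===== PORT B =====
def pvNorm (c : String) : String := if PySem.Str.endswith c ".java" then c else c ++ ".java"

def pvAdjacent (fi : PySem.Dict String (List (String × List String))) (fname : String) : List String :=
  match PySem.Dict.get? fi fname with
  | none => []
  | some info =>
    if info.isEmpty then []
    else
      (((PySem.Dict.ofList info).getD "imports" [] ++ (PySem.Dict.ofList info).getD "calls" []).map pvNorm).filter
        (fun f => PySem.Dict.contains fi f)

def fan_out_alt (files : List String) (file_index : List (String × List (String × List String))) (depth : Int) : List String :=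
  let fi : PySem.Dict String (List (String × List String)) := PySem.Dict.ofList file_index
  (PySem.List.pyRange 0 depth 1).foldl
    (fun (expanded : PySem.Set String) _ =>
      let fresh :=
        expanded.flatMap (fun f => (pvAdjacent fi f).filter (fun n => !(PySem.Set.contains expanded n)))
      PySem.Set.update expanded fresh)
    (PySem.Set.ofList files)

-- ===== PRECONDITION & SPEC =====
-- all ".java"-normalized names mentioned in any imports/calls list of the index (the only names
-- a later round can ever visit)
def pvCandidates (file_index : List (String × List (String × List String))) : List String :=
  file_index.flatMap (fun q =>
    ((PySem.Dict.ofList q.2).getD "imports" [] ++ (PySem.Dict.ofList q.2).getD "calls" []).map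
      (fun c => if PySem.Str.endswith c ".java" then c else c ++ ".java"))

-- Pre_ excludes the inputs on which A raises KeyError: a nonempty per-file dict missing the
-- "imports" or "calls" key can be visited (and then A raises) only if its key is a start file
-- (depth ≥ 1) or a mentioned ".java"-normalized name (depth ≥ 2); such entries are excluded even
-- when they happen to be unreachable, so Pre_ is slightly narrower than A's true domain (see claim cites).
def Pre_fan_out (files : List String) (file_index : List (String × List (String × List String))) (depth : Int) : Prop :=
  ∀ p ∈ file_index,
    p.2 = [] ∨ ("imports" ∈ p.2.map Prod.fst ∧ "calls" ∈ p.2.map Prod.fst) ∨ depth ≤ 0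
      ∨ (p.1 ∉ files ∧ (depth ≤ 1 ∨ p.1 ∉ pvCandidates file_index))
instance (files : List String) (file_index : List (String × List (String × List String))) (depth : Int) : Decidable (Pre_fan_out files file_index depth) := by unfold Pre_fan_out; infer_instance

def pvWitness_fan_out : List String × (List (String × List (String × List String))) × Int :=
  (["A.java"], [("A.java", [("imports", ["B"]), ("calls", [])]), ("B.java", [])], 1)

def Spec_fan_out (files : List String) (file_index : List (String × List (String × List String))) (depth : Int) (out : List String) : Prop := out = fan_out_alt files file_index depth
instance (files : List String) (file_index : List (String × List (String × List String))) (depth : Int) (out : List String) : Decidable (Spec_fan_out files file_index depth out) := by unfold Spec_fan_out; infer_instance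

-- ===== CLAIM (what is proved, stated in full; the proofs are below) =====
def Claim_equal_fan_out : Prop := ∀ (files : List String) (file_index : List (String × List (String × List String))) (depth : Int), Dom_fan_out files file_index depth → Pre_fan_out files file_index depth → Spec_fan_out files file_index depth (fan_out files file_index depth)

-- ===== LEMMAS AND PROOFS =====

-- The loop bodies of the two ports, named for the proofs (definitionally equal to the inline lambdas).
def pvStepA (fi : PySem.Dict String (List (String × List String))) (st : PySem.Set String × PySem.Set String) (_ : Int) : PySem.Set String × PySem.Set String :=
  let next_frontier :=
    st.2.foldl
      (fun (nf : PySem.Set String) fname =>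
        match PySem.Dict.get? fi fname with
        | none => nf
        | some info =>
          if info.isEmpty then nf
          else
            ((PySem.Dict.ofList info).getD "imports" [] ++ (PySem.Dict.ofList info).getD "calls" []).foldl
              (fun (nf : PySem.Set String) c =>
                let neighbor_file := if PySem.Str.endswith c ".java" then c else c ++ ".java"
                if PySem.Dict.contains fi neighbor_file && !(PySem.Set.contains st.1 neighbor_file)
                then PySem.Set.add nf neighbor_file else nf)
              nf)
      PySem.Set.empty
  (PySem.Set.update st.1 next_frontier, next_frontier)

def pvStepB (fi : PySem.Dict String (List (String × List String))) (expanded : PySem.Set String) (_ : Int) : PySem.Set String :=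
  let fresh :=
    expanded.flatMap (fun f => (pvAdjacent fi f).filter (fun n => !(PySem.Set.contains expanded n)))
  PySem.Set.update expanded fresh

-- the candidates one round adds, given the scanned list F and the current expanded set E
def pvK (fi : PySem.Dict String (List (String × List String))) (E F : List String) : List String :=
  (F.flatMap (pvAdjacent fi)).filter (fun n => !(PySem.Set.contains E n))

-- every in-index neighbour of a node of P is already in E
def pvClosed (fi : PySem.Dict String (List (String × List String))) (P E : List String) : Prop :=
  ∀ p ∈ P, ∀ n ∈ pvAdjacent fi p, n ∈ E

theorem pv_mem_foldl_add {y : String} (K : List String) (S : PySem.Set String) :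
    y ∈ K.foldl PySem.Set.add S ↔ y ∈ S ∨ y ∈ K := by
  induction K generalizing S with
  | nil => simp
  | cons c K ih => simp [List.foldl_cons, ih, PySem.Set.mem_add]; tauto

theorem pv_foldA_list (fi : PySem.Dict String (List (String × List String)))
    (E : PySem.Set String) (l : List String) (nf : PySem.Set String) :
    l.foldl
      (fun (nf : PySem.Set String) c =>
        let neighbor_file := if PySem.Str.endswith c ".java" then c else c ++ ".java"
        if PySem.Dict.contains fi neighbor_file && !(PySem.Set.contains E neighbor_file)
        then PySem.Set.add nf neighbor_file else nf)
      nf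
    = (((l.map pvNorm).filter (fun f => PySem.Dict.contains fi f)).filter
        (fun n => !(PySem.Set.contains E n))).foldl PySem.Set.add nf := by
  induction l generalizing nf with
  | nil => rfl
  | cons c l ih =>
    rw [List.foldl_cons, List.map_cons, List.filter_cons,
        show ((let neighbor_file := if PySem.Str.endswith c ".java" then c else c ++ ".java"
               if PySem.Dict.contains fi neighbor_file && !(PySem.Set.contains E neighbor_file)
               then PySem.Set.add nf neighbor_file else nf) : PySem.Set String)
          = if PySem.Dict.contains fi (pvNorm c) && !(PySem.Set.contains E (pvNorm c))
            then PySem.Set.add nf (pvNorm c) else nf from rfl]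
    cases h1 : PySem.Dict.contains fi (pvNorm c) <;>
      cases h2 : PySem.Set.contains E (pvNorm c) <;>
        simp only [List.filter_cons, h1, h2, Bool.not_true, Bool.not_false, Bool.and_true,
          Bool.and_false, reduceIte, List.foldl_cons] <;>
        exact ih _

theorem pv_nodeA_eq (fi : PySem.Dict String (List (String × List String)))
    (E nf : PySem.Set String) (fname : String) :
    (match PySem.Dict.get? fi fname with
     | none => nf
     | some info =>
       if info.isEmpty then nf
       else
         ((PySem.Dict.ofList info).getD "imports" [] ++ (PySem.Dict.ofList info).getD "calls" []).foldl
           (fun (nf : PySem.Set String) c =>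
             let neighbor_file := if PySem.Str.endswith c ".java" then c else c ++ ".java"
             if PySem.Dict.contains fi neighbor_file && !(PySem.Set.contains E neighbor_file)
             then PySem.Set.add nf neighbor_file else nf)
           nf)
    = ((pvAdjacent fi fname).filter (fun n => !(PySem.Set.contains E n))).foldl PySem.Set.add nf := by
  unfold pvAdjacent
  cases h : PySem.Dict.get? fi fname with
  | none => rfl
  | some info =>
    by_cases he : info.isEmpty
    · simp [he]
    · simp only [he, if_false, Bool.false_eq_true]
      exact pv_foldA_list fi E _ nf

theorem pv_roundA_eq (fi : PySem.Dict String (List (String × List String)))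
    (E : PySem.Set String) (F : List String) (nf : PySem.Set String) :
    F.foldl
      (fun (nf : PySem.Set String) fname =>
        match PySem.Dict.get? fi fname with
        | none => nf
        | some info =>
          if info.isEmpty then nf
          else
            ((PySem.Dict.ofList info).getD "imports" [] ++ (PySem.Dict.ofList info).getD "calls" []).foldl
              (fun (nf : PySem.Set String) c =>
                let neighbor_file := if PySem.Str.endswith c ".java" then c else c ++ ".java"
                if PySem.Dict.contains fi neighbor_file && !(PySem.Set.contains E neighbor_file)
                then PySem.Set.add nf neighbor_file else nf)
              nf)
      nf
    = (pvK fi E F).foldl PySem.Set.add nf := by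
  induction F generalizing nf with
  | nil => rfl
  | cons f F ih =>
    simp only [List.foldl_cons]
    rw [pv_nodeA_eq fi E nf f, ih]
    unfold pvK
    rw [List.flatMap_cons, List.filter_append, List.foldl_append]

theorem pv_foldl_add_foldl_add (K : List String) (S E : PySem.Set String) :
    (K.foldl PySem.Set.add S).foldl PySem.Set.add E = K.foldl PySem.Set.add (S.foldl PySem.Set.add E) := by
  induction K generalizing S with
  | nil => rfl
  | cons c K ih =>
    simp only [List.foldl_cons]
    rw [ih]
    congr 1
    by_cases hc : c ∈ S
    · rw [PySem.Set.add_of_mem hc, PySem.Set.add_of_mem]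
      exact (pv_mem_foldl_add S E).mpr (Or.inr hc)
    · rw [PySem.Set.add_of_not_mem hc, List.foldl_append]
      rfl

theorem pv_foldl_add_append (K T S : List String) (h : ∀ x ∈ K, x ∉ T) :
    K.foldl PySem.Set.add (T ++ S : PySem.Set String) = T ++ K.foldl PySem.Set.add S := by
  induction K generalizing S with
  | nil => rfl
  | cons c K ih =>
    simp only [List.foldl_cons]
    have hcT : c ∉ T := h c (by simp)
    by_cases hc : c ∈ S
    · rw [PySem.Set.add_of_mem (by simp [hc] : c ∈ (T ++ S : List String)), PySem.Set.add_of_mem hc]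
      exact ih S (fun x hx => h x (by simp [hx]))
    · rw [PySem.Set.add_of_not_mem (by simp [hc, hcT] : c ∉ (T ++ S : List String)),
          PySem.Set.add_of_not_mem hc, List.append_assoc]
      exact ih (S ++ [c]) (fun x hx => h x (by simp [hx]))

theorem pv_mem_pvK (fi : PySem.Dict String (List (String × List String)))
    (E F : List String) {n : String} (hn : n ∈ pvK fi E F) : n ∉ E := by
  unfold pvK at hn
  have := (List.mem_filter.mp hn).2
  simpa [PySem.Set.contains_iff] using this

theorem pv_pvK_closed_prefix (fi : PySem.Dict String (List (String × List String)))
    (E P F : List String) (hC : pvClosed fi P E) :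
    pvK fi E (P ++ F) = pvK fi E F := by
  unfold pvK
  rw [List.flatMap_append, List.filter_append]
  have : (P.flatMap (pvAdjacent fi)).filter (fun n => !(PySem.Set.contains E n)) = [] := by
    rw [List.filter_eq_nil_iff]
    intro n hn
    rcases List.mem_flatMap.mp hn with ⟨p, hp, hnp⟩
    simpa using hC p hp n hnp
  rw [this, List.nil_append]

theorem pv_foldl_add_split (K T : List String) (h : ∀ x ∈ K, x ∉ T) :
    K.foldl PySem.Set.add T = T ++ K.foldl PySem.Set.add [] := by
  have := pv_foldl_add_append K T [] h
  simpa using this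

theorem pv_loop_eq (fi : PySem.Dict String (List (String × List String)))
    (ls : List Int) (E F P : PySem.Set String)
    (hE : E = P ++ F) (hC : pvClosed fi P E) :
    (ls.foldl (pvStepA fi) (E, F)).1 = ls.foldl (pvStepB fi) E := by
  induction ls generalizing E F P with
  | nil => rfl
  | cons i ls ih =>
    simp only [List.foldl_cons]
    have hKnot : ∀ x ∈ pvK fi E F, x ∉ E := fun x hx => pv_mem_pvK fi E F hx
    have hA : pvStepA fi (E, F) i
        = (E ++ (pvK fi E F).foldl PySem.Set.add [], (pvK fi E F).foldl PySem.Set.add []) := by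
      unfold pvStepA
      dsimp only
      rw [pv_roundA_eq fi E F PySem.Set.empty]
      have h1 : PySem.Set.update E ((pvK fi E F).foldl PySem.Set.add PySem.Set.empty)
          = E ++ (pvK fi E F).foldl PySem.Set.add [] := by
        show ((pvK fi E F).foldl PySem.Set.add []).foldl PySem.Set.add E = _
        rw [pv_foldl_add_foldl_add]
        exact pv_foldl_add_split (pvK fi E F) E hKnot
      rw [h1]
      rfl
    have hB : pvStepB fi E i = E ++ (pvK fi E F).foldl PySem.Set.add [] := by
      unfold pvStepB
      dsimp only
      rw [← List.filter_flatMap]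
      show PySem.Set.update E (pvK fi E E) = _
      have hKK : pvK fi E E = pvK fi E F := by
        calc pvK fi E E = pvK fi E (P ++ F) := by rw [← hE]
          _ = pvK fi E F := pv_pvK_closed_prefix fi E P F hC
      rw [hKK]
      show (pvK fi E F).foldl PySem.Set.add E = _
      exact pv_foldl_add_split (pvK fi E F) E hKnot
    have hC' : pvClosed fi E (E ++ (pvK fi E F).foldl PySem.Set.add []) := by
      intro p hp n hn
      by_cases hnE : n ∈ E
      · exact List.mem_append_left _ hnE
      · rcases List.mem_append.mp (hE ▸ hp) with hpP | hpF
        · exact absurd (hC p hpP n hn) hnE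
        · refine List.mem_append_right _ ?_
          refine (pv_mem_foldl_add _ _).mpr (Or.inr ?_)
          unfold pvK
          refine List.mem_filter.mpr ⟨List.mem_flatMap.mpr ⟨p, hpF, hn⟩, ?_⟩
          simpa using hnE
    rw [hA, hB]
    exact ih _ _ E rfl hC'

-- ===== VERDICT (by name: the statement is the Claim_ definition above) =====
theorem fan_out_spec : Claim_equal_fan_out := by
  intro files file_index depth _ _
  unfold Spec_fan_out fan_out fan_out_alt
  exact pv_loop_eq (PySem.Dict.ofList file_index) (PySem.List.pyRange 0 depth 1)
    (PySem.Set.ofList files) (PySem.Set.ofList files) []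
    rfl (by intro p hp; simp at hp)
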